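-- pv_equiv track=rewrite | github.com/RajeshA1205/Athena | evolution/workflow_discovery.py | _extract_interaction_pattern
-- ===== SOURCE A (Python) =====
-- from typing import Any, Dict, List, Optional, Tuple
--
-- def _extract_interaction_pattern(interactions: List[Dict]) -> Dict[str, Any]:
--     """
--     Extract communication graph and message types from interactions.
--
--     Args:
--         interactions: List of interaction records
--
--     Returns:
--         Dictionary containing communication_graph and message_types
--     """
--     communication_graph = {}
--     message_types = {}
--
--     for interaction in interactions:
--         sender = interaction.get("sender")
--         recipient = interaction.get("recipient")
--         message_type = interaction.get("message_type", "default")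
--
--         if not sender or not recipient:
--             continue
--
--         # Build communication graph
--         if sender not in communication_graph:
--             communication_graph[sender] = []
--         if recipient not in communication_graph[sender]:
--             communication_graph[sender].append(recipient)
--
--         # Track message types
--         edge_key = f"{sender}->{recipient}"
--         if edge_key not in message_types:
--             message_types[edge_key] = []
--         if message_type not in message_types[edge_key]:
--             message_types[edge_key].append(message_type)
--
--     return {
--         "communication_graph": communication_graph,
--         "message_types": message_types,
--     }
-- ===== SOURCE B (Python) =====
-- def _dedup(xs):
--     return list(dict.fromkeys(xs))
--
--
-- def _extract_interaction_pattern(interactions):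
--     # Stage 1: project every record to a (sender, recipient, message_type)
--     # triple and keep only the valid ones.  Stage 2: group by rescanning the
--     # triple list once per distinct key (no dicts are built during the scan).
--     triples = [
--         (i.get("sender"), i.get("recipient"), i.get("message_type", "default"))
--         for i in interactions
--     ]
--     valid = [t for t in triples if t[0] and t[1]]
--     senders = _dedup(s for s, _, _ in valid)
--     graph = {s: _dedup(r for s2, r, _ in valid if s2 == s) for s in senders}
--     edges = _dedup(f"{s}->{r}" for s, r, _ in valid)
--     types = {e: _dedup(m for s, r, m in valid if f"{s}->{r}" == e) for e in edges}
--     return {"communication_graph": graph, "message_types": types}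
-- ===== Notes on version B (the rewrite author's own statement) =====
-- stated objective: alternative
-- what changed: Replaces A's single pass that mutates two dicts with inline 'not in' dedup by a staged pipeline: project records to (sender, recipient, type) triples, filter once, then build each mapping by grouping with a per-distinct-key rescan of the triple list plus one ordered dedup (dict.fromkeys); no dict is updated during the scan.
import Mathlib
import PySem

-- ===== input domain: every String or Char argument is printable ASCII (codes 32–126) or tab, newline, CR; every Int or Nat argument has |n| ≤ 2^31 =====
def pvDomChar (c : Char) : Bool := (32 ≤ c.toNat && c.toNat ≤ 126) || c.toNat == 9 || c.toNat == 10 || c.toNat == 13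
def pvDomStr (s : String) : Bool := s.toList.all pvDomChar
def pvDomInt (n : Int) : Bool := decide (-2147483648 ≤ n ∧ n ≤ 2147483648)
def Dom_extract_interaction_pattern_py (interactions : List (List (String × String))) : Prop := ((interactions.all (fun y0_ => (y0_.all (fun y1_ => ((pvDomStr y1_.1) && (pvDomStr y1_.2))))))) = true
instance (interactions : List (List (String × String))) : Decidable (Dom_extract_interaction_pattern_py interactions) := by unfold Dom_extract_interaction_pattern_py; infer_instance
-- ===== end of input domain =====

-- B is a staged re-decomposition: project records to (sender, recipient, type) triples,
-- filter once, then build each result map by a per-distinct-key rescan with ordered dedup,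
-- instead of A's single pass that mutates two dicts with inline membership checks.

-- ===== PORT A =====
-- loop body of A: inline dedup while building both dicts
def pvAStep (st : PySem.Dict String (List String) × PySem.Dict String (List String))
    (interaction : List (String × String)) :
    PySem.Dict String (List String) × PySem.Dict String (List String) :=
  let d := PySem.Dict.ofList interaction
  let sender := (d.get? "sender").getD ""          -- '' stands for falsy (None or empty string)
  let recipient := (d.get? "recipient").getD ""
  let message_type := d.getD "message_type" "default"
  if sender = "" ∨ recipient = "" then st
  else
    let g := if st.1.contains sender then st.1 else st.1.insert sender []
    let g' := if (g.getD sender []).contains recipient then g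
              else g.insert sender (g.getD sender [] ++ [recipient])
    let edge_key := sender ++ "->" ++ recipient
    let t := if st.2.contains edge_key then st.2 else st.2.insert edge_key []
    let t' := if (t.getD edge_key []).contains message_type then t
              else t.insert edge_key (t.getD edge_key [] ++ [message_type])
    (g', t')

def extract_interaction_pattern_py (interactions : List (List (String × String))) :
    List (String × List (String × List String)) :=
  let st := interactions.foldl pvAStep (PySem.Dict.empty, PySem.Dict.empty)
  [("communication_graph", st.1.items), ("message_types", st.2.items)]

-- ===== PORT B =====
-- B stage 1: the triple a record projects to
def pvTriple (interaction : List (String × String)) : String × String × String :=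
  let d := PySem.Dict.ofList interaction
  ((d.get? "sender").getD "", (d.get? "recipient").getD "", d.getD "message_type" "default")

def extract_interaction_pattern_py_alt (interactions : List (List (String × String))) :
    List (String × List (String × List String)) :=
  let triples := interactions.map pvTriple
  let valid := triples.filter (fun t => !(t.1 == "") && !(t.2.1 == ""))
  -- list(dict.fromkeys(…)) = PySem.List.dedup
  let senders := PySem.List.dedup (valid.map (fun t => t.1))
  let graph := senders.map (fun s =>
    (s, PySem.List.dedup ((valid.filter (fun t => t.1 == s)).map (fun t => t.2.1))))
  let edges := PySem.List.dedup (valid.map (fun t => t.1 ++ "->" ++ t.2.1))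
  let types := edges.map (fun e =>
    (e, PySem.List.dedup ((valid.filter (fun t => t.1 ++ "->" ++ t.2.1 == e)).map (fun t => t.2.2))))
  [("communication_graph", graph), ("message_types", types)]

-- ===== PRECONDITION & SPEC =====
def Spec_extract_interaction_pattern_py (interactions : List (List (String × String))) (out : List (String × List (String × List String))) : Prop := out = extract_interaction_pattern_py_alt interactions
instance (interactions : List (List (String × String))) (out : List (String × List (String × List String))) : Decidable (Spec_extract_interaction_pattern_py interactions out) := by unfold Spec_extract_interaction_pattern_py; infer_instance

-- ===== CLAIM =====
def Claim_equal_extract_interaction_pattern_py : Prop := ∀ (interactions : List (List (String × String))), Dom_extract_interaction_pattern_py interactions → Spec_extract_interaction_pattern_py interactions (extract_interaction_pattern_py interactions)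

-- ===== LEMMAS AND PROOFS =====

-- intermediate loop: plain append accumulation over both dicts (proof device)
def pvBStep (st : PySem.Dict String (List String) × PySem.Dict String (List String))
    (interaction : List (String × String)) :
    PySem.Dict String (List String) × PySem.Dict String (List String) :=
  let t := pvTriple interaction
  if t.1 = "" ∨ t.2.1 = "" then st
  else
    (st.1.modify t.1 [] (· ++ [t.2.1]),
     st.2.modify (t.1 ++ "->" ++ t.2.1) [] (· ++ [t.2.2]))

-- value-wise dedup of a dict
def dvals (d : PySem.Dict String (List String)) : PySem.Dict String (List String) :=
  PySem.Dict.mk (d.items.map (fun p => (p.1, PySem.Set.ofList p.2)))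

theorem contains_dvals (d : PySem.Dict String (List String)) (k : String) :
    (dvals d).contains k = d.contains k := by
  simp [dvals, PySem.Dict.contains, List.any_map, Function.comp_def]

theorem get?_dvals (d : PySem.Dict String (List String)) (k : String) :
    (dvals d).get? k = (d.get? k).map PySem.Set.ofList := by
  simp [dvals, PySem.Dict.get?, List.find?_map, Function.comp_def, Option.map_map]

theorem getD_dvals (d : PySem.Dict String (List String)) (k : String) :
    (dvals d).getD k [] = PySem.Set.ofList (d.getD k []) := by
  cases h : d.get? k <;>
    simp [PySem.Dict.getD, get?_dvals, h, PySem.Set.ofList, PySem.Set.empty]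

theorem nodup_keys_modify (d : PySem.Dict String (List String)) (k : String)
    (dflt : List String) (f : List String → List String) (h : d.keys.Nodup) :
    (d.modify k dflt f).keys.Nodup :=
  PySem.Dict.nodup_keys_insert d k _ h

-- one dict update: A's "ensure key, append if new" equals dedup of a plain append
theorem pvStep_eq (d : PySem.Dict String (List String)) (s x : String)
    (hnd : d.keys.Nodup) :
    (let g := if (dvals d).contains s then dvals d else (dvals d).insert s []
     if (g.getD s []).contains x then g else g.insert s (g.getD s [] ++ [x]))
    = dvals (d.modify s [] (· ++ [x])) := by
  show (if ((if (dvals d).contains s then dvals d else (dvals d).insert s []).getD s []).contains x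
        then (if (dvals d).contains s then dvals d else (dvals d).insert s [])
        else (if (dvals d).contains s then dvals d else (dvals d).insert s []).insert s
             ((if (dvals d).contains s then dvals d else (dvals d).insert s []).getD s [] ++ [x]))
       = dvals (d.modify s [] (· ++ [x]))
  by_cases hc : d.contains s = true
  · have hG : (if (dvals d).contains s then dvals d else (dvals d).insert s []) = dvals d := by
      simp [contains_dvals, hc]
    rw [hG, getD_dvals]
    have hmod : d.modify s [] (· ++ [x]) = d.insert s (d.getD s [] ++ [x]) := rfl
    by_cases hx : x ∈ d.getD s []
    · have hmem : List.contains (PySem.Set.ofList (d.getD s [])) x = true := by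
        simpa [PySem.Set.mem_ofList] using hx
      rw [hmem, if_pos rfl, hmod]
      apply PySem.Dict.ext
      show d.items.map (fun p => (p.1, PySem.Set.ofList p.2))
        = ((d.insert s (d.getD s [] ++ [x])).items).map (fun p => (p.1, PySem.Set.ofList p.2))
      rw [PySem.Dict.items_insert_of_contains _ _ hc, List.map_map]
      apply List.map_congr_left
      intro p hp
      by_cases hps : p.1 = s
      · have hget : d.get? p.1 = some p.2 :=
          PySem.Dict.get?_of_mem_items d (by simpa using hp) hnd
        have hv : d.getD s [] = p.2 := by
          rw [← hps]; simp [PySem.Dict.getD, hget]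
        simp only [Function.comp_apply, hps, beq_self_eq_true, if_pos]
        refine Prod.ext rfl ?_
        rw [hv, PySem.Set.ofList_append_singleton]
        exact (PySem.Set.add_of_mem (by simpa [PySem.Set.mem_ofList] using hv ▸ hx)).symm
      · simp [Function.comp_apply, hps]
    · have hmem : List.contains (PySem.Set.ofList (d.getD s [])) x = false := by
        simpa [PySem.Set.mem_ofList] using hx
      rw [hmem, if_neg (by simp), hmod]
      apply PySem.Dict.ext
      have hcd : (dvals d).contains s = true := by rw [contains_dvals]; exact hc
      show ((dvals d).insert s (PySem.Set.ofList (d.getD s []) ++ [x])).items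
        = ((d.insert s (d.getD s [] ++ [x])).items).map (fun p => (p.1, PySem.Set.ofList p.2))
      rw [PySem.Dict.items_insert_of_contains _ _ hcd, PySem.Dict.items_insert_of_contains _ _ hc]
      show (d.items.map (fun p => (p.1, PySem.Set.ofList p.2))).map _ = _
      rw [List.map_map, List.map_map]
      apply List.map_congr_left
      intro p hp
      by_cases hps : p.1 = s
      · simp only [Function.comp_apply, hps, beq_self_eq_true, if_pos]
        refine Prod.ext rfl ?_
        rw [PySem.Set.ofList_append_singleton, PySem.Set.add_of_not_mem]
        simpa [PySem.Set.mem_ofList] using hx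
      · simp [Function.comp_apply, hps]
  · have hc' : d.contains s = false := by simpa using hc
    have hG : (if (dvals d).contains s then dvals d else (dvals d).insert s [])
        = (dvals d).insert s [] := by simp [contains_dvals, hc']
    rw [hG, PySem.Dict.getD_insert_self]
    rw [if_neg (by simp), PySem.Dict.insert_insert_self]
    have hv : d.getD s [] = [] := PySem.Dict.getD_of_not_contains d [] hc'
    have hmod : d.modify s [] (· ++ [x]) = d.insert s [x] := by
      show d.insert s (d.getD s [] ++ [x]) = d.insert s [x]
      rw [hv]; rfl
    rw [hmod]
    apply PySem.Dict.ext
    have hcd : (dvals d).contains s = false := by rw [contains_dvals]; exact hc'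
    show ((dvals d).insert s ([] ++ [x])).items
      = ((d.insert s [x]).items).map (fun p => (p.1, PySem.Set.ofList p.2))
    rw [PySem.Dict.items_insert_of_not_contains _ _ hcd, PySem.Dict.items_insert_of_not_contains _ _ hc']
    simp [dvals, PySem.Set.ofList, PySem.Set.add, PySem.Set.empty]

-- the append loop keeps both key lists duplicate-free
theorem nodup_pvBStep (st : PySem.Dict String (List String) × PySem.Dict String (List String))
    (a : List (String × String)) (h1 : st.1.keys.Nodup) (h2 : st.2.keys.Nodup) :
    (pvBStep st a).1.keys.Nodup ∧ (pvBStep st a).2.keys.Nodup := by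
  by_cases h : (pvTriple a).1 = "" ∨ (pvTriple a).2.1 = ""
  · simp only [pvBStep, if_pos h]
    exact ⟨h1, h2⟩
  · simp only [pvBStep, if_neg h]
    exact ⟨nodup_keys_modify _ _ _ _ h1, nodup_keys_modify _ _ _ _ h2⟩

-- one loop iteration: A's step on the deduped state is the dedup of the append step
theorem pvAB_step (gB tB : PySem.Dict String (List String)) (a : List (String × String))
    (hg : gB.keys.Nodup) (ht : tB.keys.Nodup) :
    pvAStep (dvals gB, dvals tB) a = (dvals (pvBStep (gB, tB) a).1, dvals (pvBStep (gB, tB) a).2) := by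
  by_cases h : (pvTriple a).1 = "" ∨ (pvTriple a).2.1 = ""
  · simp only [pvTriple] at h
    simp [pvAStep, pvBStep, pvTriple, h]
  · have h' : ¬ (((PySem.Dict.ofList a).get? "sender").getD "" = ""
        ∨ ((PySem.Dict.ofList a).get? "recipient").getD "" = "") := h
    simp only [pvAStep, pvBStep, if_neg h, if_neg h']
    exact Prod.ext (pvStep_eq gB _ _ hg) (pvStep_eq tB _ _ ht)

-- the whole A-loop equals dedup of the append loop
theorem loop_eq (l : List (List (String × String)))
    (gB tB : PySem.Dict String (List String))
    (hg : gB.keys.Nodup) (ht : tB.keys.Nodup) :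
    l.foldl pvAStep (dvals gB, dvals tB)
      = (dvals (l.foldl pvBStep (gB, tB)).1, dvals (l.foldl pvBStep (gB, tB)).2) := by
  induction l generalizing gB tB with
  | nil => rfl
  | cons a l ih =>
    simp only [List.foldl_cons]
    rw [pvAB_step gB tB a hg ht]
    have h1 : (pvBStep (gB, tB) a).1.keys.Nodup := (nodup_pvBStep (gB, tB) a hg ht).1
    have h2 : (pvBStep (gB, tB) a).2.keys.Nodup := (nodup_pvBStep (gB, tB) a hg ht).2
    simpa using ih (pvBStep (gB, tB) a).1 (pvBStep (gB, tB) a).2 h1 h2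

-- the append loop splits into two independent modify-append folds over projected pairs
def pvValid (l : List (List (String × String))) : List (String × String × String) :=
  (l.map pvTriple).filter (fun t => !(t.1 == "") && !(t.2.1 == ""))

def pvGfold (pairs : List (String × String)) (d : PySem.Dict String (List String)) :
    PySem.Dict String (List String) :=
  pairs.foldl (fun d p => d.modify p.1 [] (· ++ [p.2])) d

theorem split_loop (l : List (List (String × String)))
    (g t : PySem.Dict String (List String)) :
    l.foldl pvBStep (g, t)
      = (pvGfold ((pvValid l).map (fun t => (t.1, t.2.1))) g,
         pvGfold ((pvValid l).map (fun t => (t.1 ++ "->" ++ t.2.1, t.2.2))) t) := by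
  induction l generalizing g t with
  | nil => rfl
  | cons a l ih =>
    by_cases h : (pvTriple a).1 = "" ∨ (pvTriple a).2.1 = ""
    · have hf : (!((pvTriple a).1 == "") && !((pvTriple a).2.1 == "")) = false := by
        rcases h with h | h <;> simp [h]
      simp only [List.foldl_cons, pvBStep, if_pos h, pvValid, List.map_cons,
        List.filter_cons, hf]
      exact ih g t
    · have hf : (!((pvTriple a).1 == "") && !((pvTriple a).2.1 == "")) = true := by
        rw [not_or] at h
        simp [h.1, h.2]
      simp only [List.foldl_cons, pvBStep, if_neg h, pvValid, List.map_cons,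
        List.filter_cons, hf]
      rw [ih]
      rfl

-- items of a modify-append fold from empty: ordered group-by
theorem gfold_items (pairs : List (String × String)) :
    (pvGfold pairs PySem.Dict.empty).items
      = (PySem.Set.ofList (pairs.map (·.1))).map
          (fun k => (k, (pairs.filter (fun p => p.1 == k)).map (·.2))) := by
  have hnd : (pvGfold pairs PySem.Dict.empty).keys.Nodup :=
    PySem.Dict.nodup_keys_foldl_modify_key pairs (·.1) [] (fun _ p => (· ++ [p.2]))
      PySem.Dict.empty PySem.Dict.nodup_keys_empty
  have hkeys : (pvGfold pairs PySem.Dict.empty).keys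
      = PySem.Set.ofList (pairs.map (·.1)) :=
    PySem.Dict.keys_foldl_modify_key pairs (·.1) [] (fun _ p => (· ++ [p.2])) PySem.Dict.empty
  rw [PySem.Dict.items_eq_map_keys _ hnd [], hkeys]
  apply List.map_congr_left
  intro k _
  have := PySem.Dict.getD_foldl_modify_append pairs PySem.Dict.empty k
  simp only [pvGfold]
  rw [this]
  simp [PySem.Dict.getD_empty]

-- ===== VERDICT =====
theorem extract_interaction_pattern_py_spec : Claim_equal_extract_interaction_pattern_py := by
  intro interactions _
  unfold Spec_extract_interaction_pattern_py extract_interaction_pattern_py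
    extract_interaction_pattern_py_alt
  have h := loop_eq interactions PySem.Dict.empty PySem.Dict.empty
    PySem.Dict.nodup_keys_empty PySem.Dict.nodup_keys_empty
  rw [show dvals PySem.Dict.empty = PySem.Dict.empty from rfl] at h
  rw [h, split_loop]
  simp only [dvals, gfold_items]
  simp [pvValid, List.map_map, List.filter_map, List.filter_filter, Function.comp_def,
    PySem.List.dedup_eq_ofList]
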